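-- pv_equiv track=rewrite | github.com/ClemenceLVR/Terminator | Terminator/Main0803.py | findOrgans
-- ===== SOURCE A (Python) =====
-- def findOrgans(source, dicoOrgans):
--     resFinal = [] #organes trouves
--     pos = [] #liste des positions des organes trouves
--     source = source.lower()
--     if dicoOrgans!={}:
--         for key in dicoOrgans: # parcours des cles du dico
--             org = source.find(key)
--
-- #.find est une fct qui retourne la position d un string si on le trouve dans un autre string
-- #.find retourne -1 comme valeur sentinelle s il n y a pas match entre les string
--             if org!=-1: #si on a trouve un match et que la position est differente de la valeur sentinelle
--                 resFinal.append(key) #on recupere la cle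
--                 pos.append(org) #on recupere sa position
--             else : #si la cle n existe pas dans le texte
--                 l_aux = dicoOrgans[key]
--                 # creation d'une liste auxiliaire pour chaque cle, constituee des valeurs
--                 for i in range(len(l_aux)):
--                     syn = source.find(l_aux[i]) #on refait la recherche avec les valeurs synonymes
--                     if syn!=-1: # si la valeur i de la liste de valeurs de la cle correspond à l'organe
--                         resFinal.append(key) #on remplace le synonyme par le nom de l'organe general
--                         pos.append(syn)
--     return(resFinal, pos)
-- ===== SOURCE B (Python) =====
-- def findOrgans(source, dicoOrgans):
--     # One position-major sweep: a prefix set (flattened trie) of all distinct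
--     # keys/synonyms lets each position be examined in O(max pattern length);
--     # the first occurrence of every pattern is recorded in a dict, from which
--     # the same (names, positions) output is rebuilt in key order.
--     src = source.lower()
--     items = list(dicoOrgans.items())
--     pats = set()
--     for key, syns in items:
--         pats.add(key)
--         pats.update(syns)
--     maxlen = 0
--     for p in pats:
--         maxlen = max(maxlen, len(p))
--     prefixes = set()
--     for p in pats:
--         for k in range(len(p) + 1):
--             prefixes.add(p[:k])
--     first = {}
--     for i in range(len(src) + 1):
--         for k in range(maxlen + 1):
--             t = src[i:i + k]
--             if t not in prefixes:
--                 break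
--             if t in pats and t not in first:
--                 first[t] = i
--     res, pos = [], []
--     for key, syns in items:
--         if key in first:
--             res.append(key)
--             pos.append(first[key])
--         else:
--             for s in syns:
--                 if s in first:
--                     res.append(key)
--                     pos.append(first[s])
--     return res, pos
-- ===== Notes on version B (the rewrite author's own statement) =====
-- stated objective: faster
-- what changed: A scans the whole source once per pattern via source.find (pattern-major); B builds a set of all distinct keys/synonyms plus a prefix set (flattened trie) over them, makes a single position-major left-to-right sweep over the lowered source that walks each position's window through the prefix set (breaking as soon as the window is no prefix) to record every pattern's first occurrence in a dict, and then rebuilds the same (names, positions) output in key order.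
import Mathlib
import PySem

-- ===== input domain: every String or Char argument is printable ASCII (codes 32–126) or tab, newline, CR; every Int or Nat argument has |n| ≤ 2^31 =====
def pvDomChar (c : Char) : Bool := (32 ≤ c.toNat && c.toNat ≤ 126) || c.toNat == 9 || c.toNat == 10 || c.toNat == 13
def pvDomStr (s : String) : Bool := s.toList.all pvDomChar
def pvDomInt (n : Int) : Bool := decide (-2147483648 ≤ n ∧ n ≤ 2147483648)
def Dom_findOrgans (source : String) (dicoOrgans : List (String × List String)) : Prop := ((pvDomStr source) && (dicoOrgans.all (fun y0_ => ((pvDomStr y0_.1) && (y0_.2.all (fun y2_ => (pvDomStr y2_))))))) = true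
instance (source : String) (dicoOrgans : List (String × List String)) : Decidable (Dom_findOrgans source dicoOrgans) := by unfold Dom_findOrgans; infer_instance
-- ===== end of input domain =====

-- B replaces A's pattern-major repeated source.find scans by ONE position-major sweep over the
-- lowered source guided by a prefix set of all patterns, recording each pattern's first
-- occurrence in a dict and rebuilding the same output in key order (objective: faster;
-- measured faster in a timing run on large generated inputs).

-- ===== PORT A =====
-- A: for each dict key, source.find(key); if -1, source.find on each synonym, by index.
def findOrgans (source : String) (dicoOrgans : List (String × List String)) : List String × List Int :=
  let src := PySem.Str.lower source
  let d := PySem.Dict.ofList dicoOrgans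
  if d.items = [] then ([], []) else
  d.items.foldl (fun acc kv =>
    let org := PySem.Str.find src kv.1
    if org ≠ -1 then (acc.1 ++ [kv.1], acc.2 ++ [org])
    else
      (PySem.List.pyRange 0 (PySem.List.len kv.2)).foldl (fun acc2 i =>
        let syn := PySem.Str.find src (PySem.List.pyGetD kv.2 i "")
        if syn ≠ -1 then (acc2.1 ++ [kv.1], acc2.2 ++ [syn]) else acc2) acc)
    ([], [])

-- ===== PORT B =====
-- B-side helper: the position-major sweep ('for i in range(len(src)+1): for k in range(maxlen+1): …' with break).
def pvScan (src : List Char) (pats prefixes : PySem.Set (List Char)) (maxlen : Int) :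
    PySem.Dict (List Char) Int :=
  (PySem.List.pyRange 0 ((src.length : Int) + 1)).foldl
    (fun first i =>
      ((PySem.List.pyRange 0 (maxlen + 1)).foldl
        (fun (st : PySem.Dict (List Char) Int × Bool) k =>
          if st.2 then st  -- broken out of the k-loop
          else if prefixes.contains (PySem.List.slice src (some i) (some (i + k))) = false then (st.1, true)
          else if pats.contains (PySem.List.slice src (some i) (some (i + k)))
                  && !st.1.contains (PySem.List.slice src (some i) (some (i + k)))
            then (st.1.insert (PySem.List.slice src (some i) (some (i + k))) i, false)
          else st)
        (first, false)).1)
    PySem.Dict.empty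

def findOrgans_alt (source : String) (dicoOrgans : List (String × List String)) : List String × List Int :=
  let src := (PySem.Str.lower source).toList
  let items := (PySem.Dict.ofList dicoOrgans).items
  let pats : PySem.Set (List Char) :=
    items.foldl (fun s kv => PySem.Set.update (PySem.Set.add s kv.1.toList) (kv.2.map String.toList))
      PySem.Set.empty
  let maxlen : Int := pats.foldl (fun m p => max m (p.length : Int)) 0
  let prefixes : PySem.Set (List Char) :=
    pats.foldl (fun pr p =>
      (PySem.List.pyRange 0 ((p.length : Int) + 1)).foldl
        (fun pr k => PySem.Set.add pr (PySem.List.slice p none (some k))) pr)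
      PySem.Set.empty
  let first := pvScan src pats prefixes maxlen
  items.foldl (fun acc kv =>
    if first.contains kv.1.toList then (acc.1 ++ [kv.1], acc.2 ++ [first.getD kv.1.toList 0])
    else kv.2.foldl (fun acc2 s =>
      if first.contains s.toList then (acc2.1 ++ [kv.1], acc2.2 ++ [first.getD s.toList 0])
      else acc2) acc)
    ([], [])

-- ===== PRECONDITION & SPEC =====
def Spec_findOrgans (source : String) (dicoOrgans : List (String × List String)) (out : List String × List Int) : Prop := out = findOrgans_alt source dicoOrgans
instance (source : String) (dicoOrgans : List (String × List String)) (out : List String × List Int) : Decidable (Spec_findOrgans source dicoOrgans out) := by unfold Spec_findOrgans; infer_instance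

-- ===== CLAIM (what is proved, stated in full; the proofs are below) =====
def Claim_equal_findOrgans : Prop := ∀ (source : String) (dicoOrgans : List (String × List String)), Dom_findOrgans source dicoOrgans → Spec_findOrgans source dicoOrgans (findOrgans source dicoOrgans)

-- ===== LEMMAS AND PROOFS =====

-- the inner k-loop's body at source position i (proof-side name for the port's lambda)
def pvStep (src : List Char) (pats prefixes : PySem.Set (List Char)) (i : Nat) :
    PySem.Dict (List Char) Int × Bool → Nat → PySem.Dict (List Char) Int × Bool :=
  fun st k =>
    if st.2 then st
    else if prefixes.contains ((src.drop i).take k) = false then (st.1, true)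
    else if pats.contains ((src.drop i).take k) && !st.1.contains ((src.drop i).take k)
      then (st.1.insert ((src.drop i).take k) (i : Int), false)
    else st

-- membership in the pattern-set accumulator
lemma pvMemPats (items : List (String × List String)) (s0 : PySem.Set (List Char)) (y : List Char) :
    y ∈ items.foldl (fun s kv => PySem.Set.update (PySem.Set.add s kv.1.toList) (kv.2.map String.toList)) s0
    ↔ y ∈ s0 ∨ ∃ kv ∈ items, y = kv.1.toList ∨ y ∈ kv.2.map String.toList := by
  induction items generalizing s0 with
  | nil => simp
  | cons kv rest ih =>
    rw [List.foldl_cons, ih]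
    simp only [PySem.Set.mem_update, PySem.Set.mem_add, List.mem_cons]
    constructor
    · rintro (((h | h) | h) | ⟨kv', hkv', h⟩)
      · exact Or.inl h
      · exact Or.inr ⟨kv, Or.inl rfl, Or.inl h⟩
      · exact Or.inr ⟨kv, Or.inl rfl, Or.inr h⟩
      · exact Or.inr ⟨kv', Or.inr hkv', h⟩
    · rintro (h | ⟨kv', hkv' | hkv', h⟩)
      · exact Or.inl (Or.inl (Or.inl h))
      · subst hkv'
        rcases h with h | h
        · exact Or.inl (Or.inl (Or.inr h))
        · exact Or.inl (Or.inr h)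
      · exact Or.inr ⟨kv', hkv', h⟩

-- membership in the prefix-set accumulator
lemma pvMemPrefixes (pats : List (List Char)) (s0 : PySem.Set (List Char)) (y : List Char) :
    y ∈ pats.foldl (fun pr p =>
        (List.range (p.length + 1)).foldl (fun pr k => PySem.Set.add pr (p.take k)) pr) s0
    ↔ y ∈ s0 ∨ ∃ p ∈ pats, ∃ k, k < p.length + 1 ∧ y = p.take k := by
  induction pats generalizing s0 with
  | nil => simp
  | cons p rest ih =>
    rw [List.foldl_cons, ih, PySem.Set.mem_foldl_add]
    simp only [List.mem_range, List.mem_cons]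
    constructor
    · rintro ((h | ⟨k, hk, h⟩) | ⟨p', hp', k, hk, h⟩)
      · exact Or.inl h
      · exact Or.inr ⟨p, Or.inl rfl, k, hk, h⟩
      · exact Or.inr ⟨p', Or.inr hp', k, hk, h⟩
    · rintro (h | ⟨p', hp' | hp', k, hk, h⟩)
      · exact Or.inl (Or.inl h)
      · subst hp'; exact Or.inl (Or.inr ⟨k, hk, h⟩)
      · exact Or.inr ⟨p', hp', k, hk, h⟩

-- the state of the k-loop after its first k iterations
lemma pvInner_state (src : List Char) (pats prefixes : PySem.Set (List Char)) (i : Nat)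
    (hclos : ∀ p ∈ pats, ∀ j : Nat, p.take j ∈ prefixes)
    (f : PySem.Dict (List Char) Int) (k : Nat) :
    ((List.range k).foldl (pvStep src pats prefixes i) (f, false)).2
      = decide (∃ j < k, (src.drop i).take j ∉ prefixes)
    ∧ ∀ q, ((List.range k).foldl (pvStep src pats prefixes i) (f, false)).1.get? q =
        if q ∈ pats ∧ f.contains q = false ∧ q <+: src.drop i ∧ q.length < k
        then some (i : Int) else f.get? q := by
  -- a pattern matching at i keeps every shorter window inside the prefix set
  have hgood : ∀ q, q ∈ pats → q <+: src.drop i → ∀ j ≤ q.length, (src.drop i).take j ∈ prefixes := by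
    intro q hq hpref j hj
    have htake : (src.drop i).take j = q.take j := by
      rcases hpref with ⟨t, ht⟩
      rw [← ht, List.take_append_of_le_length hj]
    rw [htake]
    exact hclos q hq j
  -- a pattern of length exactly k matching at i IS the k-window
  have hwin : ∀ q, q <+: src.drop i → ∀ k : Nat, q.length = k → (src.drop i).take k = q := by
    intro q hpref k hk
    rcases hpref with ⟨t, ht⟩
    rw [← ht, ← hk, List.take_append_of_le_length (le_refl _), List.take_length]
  induction k with
  | zero => simp
  | succ k ih =>
    rw [List.range_succ, List.foldl_append, List.foldl_cons, List.foldl_nil]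
    obtain ⟨ihflag, ihdict⟩ := ih
    set st := (List.range k).foldl (pvStep src pats prefixes i) (f, false) with hst
    have hcont : ∀ q, st.1.contains q = true ↔
        ((q ∈ pats ∧ f.contains q = false ∧ q <+: src.drop i ∧ q.length < k)
          ∨ f.contains q = true) := by
      intro q
      rw [PySem.Dict.contains_eq_isSome_get?, ihdict q]
      by_cases h : q ∈ pats ∧ f.contains q = false ∧ q <+: src.drop i ∧ q.length < k
      · simp [h]
      · simp [h, ← PySem.Dict.contains_eq_isSome_get?]
    unfold pvStep
    by_cases hflag : st.2 = true
    · -- already broken out: the state is unchanged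
      have hex : ∃ j < k, (src.drop i).take j ∉ prefixes := by
        have h1 := ihflag; rw [hflag] at h1
        exact of_decide_eq_true h1.symm
      rw [if_pos hflag]
      constructor
      · rw [ihflag, decide_eq_decide]
        exact ⟨fun ⟨j, hj, hn⟩ => ⟨j, by omega, hn⟩, fun _ => hex⟩
      · intro q
        rw [ihdict q]
        by_cases hc : q ∈ pats ∧ f.contains q = false ∧ q <+: src.drop i ∧ q.length < k + 1
        · have hlt : q.length < k := by
            rcases hc with ⟨hq, hf2, hpref, hlen⟩
            rcases Nat.lt_succ_iff_lt_or_eq.mp hlen with h | h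
            · exact h
            · exfalso
              rcases hex with ⟨j, hj, hn⟩
              exact hn (hgood q hq hpref j (by omega))
          rw [if_pos ⟨hc.1, hc.2.1, hc.2.2.1, hlt⟩, if_pos hc]
        · rw [if_neg (by rintro ⟨h1, h2, h3, h4⟩; exact hc ⟨h1, h2, h3, by omega⟩), if_neg hc]
    · have hallgood : ∀ j < k, (src.drop i).take j ∈ prefixes := by
        intro j hj
        by_contra hn
        exact hflag (by rw [ihflag]; exact decide_eq_true ⟨j, hj, hn⟩)
      rw [if_neg hflag]
      by_cases hpre : prefixes.contains ((src.drop i).take k) = false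
      · -- the k-window leaves the prefix set: break, nothing of length k matches
        have hnot : (src.drop i).take k ∉ prefixes := by
          intro hmem
          rw [← PySem.Set.contains_iff] at hmem
          rw [hpre] at hmem; cases hmem
        rw [if_pos hpre]
        constructor
        · exact (decide_eq_true ⟨k, by omega, hnot⟩).symm
        · intro q
          rw [ihdict q]
          by_cases hc : q ∈ pats ∧ f.contains q = false ∧ q <+: src.drop i ∧ q.length < k + 1
          · have hlt : q.length < k := by
              rcases hc with ⟨hq, hf2, hpref2, hlen⟩
              rcases Nat.lt_succ_iff_lt_or_eq.mp hlen with h | h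
              · exact h
              · exact absurd (hgood q hq hpref2 k (by omega)) hnot
            rw [if_pos ⟨hc.1, hc.2.1, hc.2.2.1, hlt⟩, if_pos hc]
          · rw [if_neg (by rintro ⟨h1, h2, h3, h4⟩; exact hc ⟨h1, h2, h3, by omega⟩), if_neg hc]
      · have hmem : (src.drop i).take k ∈ prefixes := by
          rw [← PySem.Set.contains_iff]
          simpa using hpre
        rw [if_neg hpre]
        have hnoex1 : ¬ ∃ j < k + 1, (src.drop i).take j ∉ prefixes := by
          rintro ⟨j, hj, hn⟩
          rcases Nat.lt_succ_iff_lt_or_eq.mp hj with h | h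
          · exact hn (hallgood j h)
          · subst h; exact hn hmem
        by_cases hins : (pats.contains ((src.drop i).take k)
            && !st.1.contains ((src.drop i).take k)) = true
        · rw [if_pos hins]
          refine ⟨(decide_eq_false hnoex1).symm, ?_⟩
          have hins' := hins
          rw [Bool.and_eq_true] at hins'
          have htp : (src.drop i).take k ∈ pats :=
            (PySem.Set.contains_iff _ _).mp hins'.1
          have htnc : ¬ st.1.contains ((src.drop i).take k) = true := by
            have h2 := hins'.2
            simp only [Bool.not_eq_true'] at h2
            simp [h2]
          have htpref : (src.drop i).take k <+: src.drop i := List.take_prefix _ _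
          have htf : f.contains ((src.drop i).take k) = false := by
            by_contra hfc
            exact htnc ((hcont _).mpr (Or.inr (by simpa using hfc)))
          intro q
          by_cases hq : q = (src.drop i).take k
          · subst hq
            rw [PySem.Dict.get?_insert_self,
              if_pos ⟨htp, htf, htpref, by have := List.length_take_le k (src.drop i); omega⟩]
          · rw [PySem.Dict.get?_insert_of_ne _ _ hq, ihdict q]
            by_cases hc : q ∈ pats ∧ f.contains q = false ∧ q <+: src.drop i ∧ q.length < k + 1
            · have hlt : q.length < k := by
                rcases hc with ⟨h1, h2, h3, h4⟩
                rcases Nat.lt_succ_iff_lt_or_eq.mp h4 with h | h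
                · exact h
                · exact absurd (hwin q h3 k h).symm hq
              rw [if_pos ⟨hc.1, hc.2.1, hc.2.2.1, hlt⟩, if_pos hc]
            · rw [if_neg (by rintro ⟨h1, h2, h3, h4⟩; exact hc ⟨h1, h2, h3, by omega⟩), if_neg hc]
        · rw [if_neg hins]
          constructor
          · rw [ihflag, decide_eq_decide]
            exact ⟨fun ⟨j, hj, hn⟩ => absurd (hallgood j hj) hn, fun h => absurd h hnoex1⟩
          · intro q
            rw [ihdict q]
            by_cases hc : q ∈ pats ∧ f.contains q = false ∧ q <+: src.drop i ∧ q.length < k + 1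
            · have hlt : q.length < k := by
                rcases hc with ⟨h1, h2, h3, h4⟩
                rcases Nat.lt_succ_iff_lt_or_eq.mp h4 with h | h
                · exact h
                · -- q IS the k-window; the insert branch would then have fired
                  exfalso
                  have hqt : (src.drop i).take k = q := hwin q h3 k h
                  apply hins
                  rw [Bool.and_eq_true, hqt]
                  refine ⟨(PySem.Set.contains_iff _ _).mpr h1, ?_⟩
                  simp only [Bool.not_eq_true']
                  rw [Bool.eq_false_iff]
                  intro hct
                  rcases (hcont q).mp hct with ⟨-, -, -, hlt2⟩ | hfc
                  · omega
                  · rw [h2] at hfc; cases hfc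
              rw [if_pos ⟨hc.1, hc.2.1, hc.2.2.1, hlt⟩, if_pos hc]
            · rw [if_neg (by rintro ⟨h1, h2, h3, h4⟩; exact hc ⟨h1, h2, h3, by omega⟩), if_neg hc]

-- the k-loop's dict, once the loop covers every pattern length
lemma pvInner_dict (src : List Char) (pats prefixes : PySem.Set (List Char)) (i : Nat) (K : Nat)
    (hclos : ∀ p ∈ pats, ∀ j : Nat, p.take j ∈ prefixes)
    (hlenK : ∀ p ∈ pats, p.length < K)
    (f : PySem.Dict (List Char) Int) (q : List Char) :
    ((List.range K).foldl (pvStep src pats prefixes i) (f, false)).1.get? q =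
      if q ∈ pats ∧ f.contains q = false ∧ q <+: src.drop i then some (i : Int) else f.get? q := by
  rw [(pvInner_state src pats prefixes i hclos f K).2 q]
  by_cases hc : q ∈ pats ∧ f.contains q = false ∧ q <+: src.drop i
  · rw [if_pos ⟨hc.1, hc.2.1, hc.2.2, hlenK q hc.1⟩, if_pos hc]
  · rw [if_neg (by rintro ⟨h1, h2, h3, -⟩; exact hc ⟨h1, h2, h3⟩), if_neg hc]

-- the sweep over positions 0..m-1, characterised
lemma pvScan_invariant (src : List Char) (pats prefixes : PySem.Set (List Char)) (K : Nat)
    (hclos : ∀ p ∈ pats, ∀ j : Nat, p.take j ∈ prefixes)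
    (hlenK : ∀ p ∈ pats, p.length < K)
    (m : Nat) (q : List Char) :
    (((List.range m).foldl
      (fun first i => ((List.range K).foldl (pvStep src pats prefixes i) (first, false)).1)
      PySem.Dict.empty)).get? q
    = if q ∈ pats ∧ ∃ j < m, q <+: src.drop j then some (PySem.Chars.find src q) else none := by
  induction m with
  | zero => simp [PySem.Dict.get?_empty]
  | succ m ih =>
    rw [List.range_succ, List.foldl_append, List.foldl_cons, List.foldl_nil]
    rw [pvInner_dict src pats prefixes m K hclos hlenK _ q]
    set F := ((List.range m).foldl
      (fun first i => ((List.range K).foldl (pvStep src pats prefixes i) (first, false)).1)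
      PySem.Dict.empty) with hF
    have hcont : F.contains q = (decide (q ∈ pats ∧ ∃ j < m, q <+: src.drop j)) := by
      rw [PySem.Dict.contains_eq_isSome_get?, ih]
      by_cases h : q ∈ pats ∧ ∃ j < m, q <+: src.drop j <;> simp [h]
    by_cases hmem : q ∈ pats
    · by_cases hold : ∃ j < m, q <+: src.drop j
      · have hct : F.contains q = true := by rw [hcont]; simp [hmem, hold]
        rw [if_neg (by simp [hct]), ih,
          if_pos ⟨hmem, hold⟩, if_pos ⟨hmem, hold.elim fun j hj => ⟨j, Nat.lt_succ_of_lt hj.1, hj.2⟩⟩]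
      · have hcf : F.contains q = false := by rw [hcont]; simp [hold]
        by_cases hnow : q <+: src.drop m
        · rw [if_pos ⟨hmem, hcf, hnow⟩, if_pos ⟨hmem, m, Nat.lt_succ_self m, hnow⟩]
          have hinfix : q <:+: src := by
            rcases hnow with ⟨t, ht⟩
            exact ⟨src.take m, t, by rw [List.append_assoc, ht, List.take_append_drop]⟩
          have h0 : 0 ≤ PySem.Chars.find src q := (PySem.Chars.find_nonneg_iff src q).mpr hinfix
          obtain ⟨hpref, hmin⟩ := PySem.Chars.find_spec h0
          have hle : (PySem.Chars.find src q).toNat ≤ m := by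
            by_contra hgt
            exact hmin m (by omega) hnow
          have hge : m ≤ (PySem.Chars.find src q).toNat := by
            by_contra hlt
            exact hold ⟨(PySem.Chars.find src q).toNat, by omega, hpref⟩
          rw [show PySem.Chars.find src q = (m : Int) by omega]
        · rw [if_neg (by rintro ⟨-, -, h⟩; exact hnow h), ih, if_neg (by simp [hold]), if_neg]
          rintro ⟨-, j, hj, hpref⟩
          rcases Nat.lt_succ_iff_lt_or_eq.mp hj with h | h
          · exact hold ⟨j, h, hpref⟩
          · subst h; exact hnow hpref
    · rw [if_neg (by simp [hmem]), ih, if_neg (by simp [hmem]), if_neg (by simp [hmem])]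

-- the scan's dict answers exactly like source.find
lemma pvScan_get? (src : List Char) (pats prefixes : PySem.Set (List Char)) (maxlen : Int)
    (hml : 0 ≤ maxlen)
    (hclos : ∀ p ∈ pats, ∀ j : Nat, p.take j ∈ prefixes)
    (hlen : ∀ p ∈ pats, (p.length : Int) ≤ maxlen)
    (q : List Char) (hq : q ∈ pats) :
    (pvScan src pats prefixes maxlen).get? q
    = if q <:+: src then some (PySem.Chars.find src q) else none := by
  unfold pvScan
  rw [show ((src.length : Int) + 1) = ((src.length + 1 : Nat) : Int) by push_cast; ring,
    show maxlen + 1 = ((maxlen.toNat + 1 : Nat) : Int) by omega]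
  simp only [PySem.List.pyRange_zero_natCast, List.foldl_map, ← Nat.cast_add,
    PySem.List.slice_natCast, Nat.add_sub_cancel_left]
  refine Eq.trans (b := if q ∈ pats ∧ ∃ j < src.length + 1, q <+: src.drop j
      then some (PySem.Chars.find src q) else none)
    (pvScan_invariant src pats prefixes (maxlen.toNat + 1) hclos
      (fun p hp => by have := hlen p hp; omega) (src.length + 1) q) ?_
  congr 1
  simp only [hq, true_and, eq_iff_iff]
  constructor
  · rintro ⟨j, -, hpref⟩
    rcases hpref with ⟨t, ht⟩
    exact ⟨src.take j, t, by rw [List.append_assoc, ht, List.take_append_drop]⟩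
  · intro hinf
    have hex : ∃ j, q <+: src.drop j := by
      rw [PySem.Chars.exists_prefix_drop_iff_isIn, PySem.Chars.isIn_iff_infix]
      exact hinf
    rcases hex with ⟨j, hpref⟩
    by_cases hj : j < src.length + 1
    · exact ⟨j, hj, hpref⟩
    · have hnil : src.drop j = [] := List.drop_eq_nil_of_le (by omega)
      rw [hnil, List.prefix_nil] at hpref
      exact ⟨0, by omega, by simp [hpref]⟩

lemma pvScan_contains (src : List Char) (pats prefixes : PySem.Set (List Char)) (maxlen : Int)
    (hml : 0 ≤ maxlen)
    (hclos : ∀ p ∈ pats, ∀ j : Nat, p.take j ∈ prefixes)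
    (hlen : ∀ p ∈ pats, (p.length : Int) ≤ maxlen)
    (q : List Char) (hq : q ∈ pats) :
    (pvScan src pats prefixes maxlen).contains q = decide (q <:+: src) := by
  rw [PySem.Dict.contains_eq_isSome_get?, pvScan_get? src pats prefixes maxlen hml hclos hlen q hq]
  by_cases h : q <:+: src <;> simp [h]

-- ===== VERDICT (by name: the statement is the Claim_ definition above) =====
theorem findOrgans_spec : Claim_equal_findOrgans := by
  intro source dicoOrgans _
  unfold Spec_findOrgans findOrgans findOrgans_alt
  simp only []
  set src := PySem.Str.lower source with hsrc
  set items := (PySem.Dict.ofList dicoOrgans).items with hitems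
  set pats := items.foldl
    (fun s kv => PySem.Set.update (PySem.Set.add s kv.1.toList) (kv.2.map String.toList))
    PySem.Set.empty with hpats
  set maxlen := pats.foldl (fun m p => max m (p.length : Int)) 0 with hmaxlen
  set prefixes := pats.foldl (fun pr p =>
      (PySem.List.pyRange 0 ((p.length : Int) + 1)).foldl
        (fun pr k => PySem.Set.add pr (PySem.List.slice p none (some k))) pr)
      PySem.Set.empty with hprefixes
  have hmaxprops := PySem.List.le_foldl_max_int pats (fun p => (p.length : Int)) 0
  have hml : 0 ≤ maxlen := hmaxprops.1
  have hlen : ∀ p ∈ pats, (p.length : Int) ≤ maxlen := hmaxprops.2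
  have hprefix_eq : prefixes = pats.foldl (fun pr p =>
      (List.range (p.length + 1)).foldl (fun pr k => PySem.Set.add pr (p.take k)) pr)
      PySem.Set.empty := by
    rw [hprefixes]
    apply PySem.List.foldl_congr_mem
    intro pr p hp
    rw [show ((p.length : Int) + 1) = ((p.length + 1 : Nat) : Int) by push_cast; ring,
      PySem.List.pyRange_zero_natCast, List.foldl_map]
    apply PySem.List.foldl_congr_mem
    intro acc k hk
    rw [PySem.List.slice_to _ (by positivity), Int.toNat_natCast]
  have hclos : ∀ p ∈ pats, ∀ j : Nat, p.take j ∈ prefixes := by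
    intro p hp j
    rw [hprefix_eq, pvMemPrefixes]
    by_cases hj : j ≤ p.length
    · exact Or.inr ⟨p, hp, j, by omega, rfl⟩
    · refine Or.inr ⟨p, hp, p.length, by omega, ?_⟩
      rw [List.take_length, List.take_of_length_le (by omega)]
  have hmem : ∀ kv ∈ items, kv.1.toList ∈ pats ∧ ∀ s ∈ kv.2, s.toList ∈ pats := by
    intro kv hkv
    constructor
    · rw [hpats, pvMemPats]
      exact Or.inr ⟨kv, hkv, Or.inl rfl⟩
    · intro s hs
      rw [hpats, pvMemPats]
      exact Or.inr ⟨kv, hkv, Or.inr (List.mem_map_of_mem hs)⟩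
  have key : ∀ q : String, q.toList ∈ pats →
      ((pvScan src.toList pats prefixes maxlen).contains q.toList
          = !(decide (PySem.Str.find src q = -1))
       ∧ (PySem.Str.find src q ≠ -1 →
          (pvScan src.toList pats prefixes maxlen).getD q.toList 0 = PySem.Str.find src q)) := by
    intro q hq
    have hfq : PySem.Str.find src q = PySem.Chars.find src.toList q.toList := PySem.Str.find_eq src q
    have hc := pvScan_contains src.toList pats prefixes maxlen hml hclos hlen q.toList hq
    have hg := pvScan_get? src.toList pats prefixes maxlen hml hclos hlen q.toList hq
    constructor
    · rw [hc, hfq]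
      by_cases h : q.toList <:+: src.toList
      · have hne : PySem.Chars.find src.toList q.toList ≠ -1 :=
          (PySem.Chars.find_ne_neg_one_iff _ _).mpr h
        simp [h, hne]
      · have heq : PySem.Chars.find src.toList q.toList = -1 :=
          (PySem.Chars.find_eq_neg_one_iff _ _).mpr h
        simp [h, heq]
    · intro hne
      rw [hfq] at hne
      have h : q.toList <:+: src.toList := (PySem.Chars.find_ne_neg_one_iff _ _).mp hne
      rw [PySem.Dict.getD_eq_get?_getD, hg, if_pos h, hfq]
      rfl
  by_cases hempty : items = []
  · simp [hempty]
  · rw [if_neg hempty]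
    apply PySem.List.foldl_congr_mem
    intro acc kv hkv
    obtain ⟨hk, hsyn⟩ := hmem kv hkv
    obtain ⟨hck, hgk⟩ := key kv.1 hk
    by_cases horg : PySem.Str.find src kv.1 ≠ -1
    · rw [if_pos horg, if_pos (by rw [hck]; simpa using horg), hgk horg]
    · rw [if_neg horg, if_neg (by rw [hck]; simpa using horg),
        PySem.List.foldl_pyRange_pyGetD kv.2 ""
          (fun acc2 s => if PySem.Str.find src s ≠ -1
            then (acc2.1 ++ [kv.1], acc2.2 ++ [PySem.Str.find src s]) else acc2) acc (le_refl 0)]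
      simp only [Int.toNat_zero, List.drop_zero]
      apply PySem.List.foldl_congr_mem
      intro acc2 s hs
      obtain ⟨hcs, hgs⟩ := key s (hsyn s hs)
      by_cases hsf : PySem.Str.find src s ≠ -1
      · rw [if_pos hsf, if_pos (by rw [hcs]; simpa using hsf), hgs hsf]
      · rw [if_neg hsf, if_neg (by rw [hcs]; simpa using hsf)]
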